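-- pv_equiv track=rewrite | github.com/alaporta85/FantaScandalo | new_mantra.py | too_many_attackers
-- ===== SOURCE A (Python) =====
-- def too_many_attackers(list_of_roles: list) -> bool:
--
--     # It is not possible to play with 3 Pc
--     pc_count = sum([1 for i in list_of_roles if i == 'Pc'])
--     cond1 = pc_count == 3
--
--     # It is not possible to play with 2 Pc + A
--     a_count = sum([1 for i in list_of_roles if i == 'A'])
--     cond2 = pc_count == 2 and a_count > 0
--
--     # It is not possible to play with 2 Pc + >1 T
--     t_count = sum([1 for i in list_of_roles if i == 'T'])
--     ta_count = sum([1 for i in list_of_roles if i == 'T/A'])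
--     cond3 = pc_count == 2 and (t_count + ta_count) > 1
--
--     # It is not possible to play with 1 Pc + >2 A
--     cond4 = pc_count + a_count > 3
--
--     return True if (cond1 | cond2 | cond3 | cond4) else False
-- ===== SOURCE B (Python) =====
-- def too_many_attackers(list_of_roles: list) -> bool:
--     # Single early-exit scan: maintain running counts and stop as soon as the
--     # (monotone) illegality condition  pc>=3 or pc+a>=4 or (pc>=2 and (a>=1 or wings>=2))
--     # becomes true; it is equivalent to A's final four-condition test.
--     pc = atk = wings = 0
--     for r in list_of_roles:
--         if r == 'Pc':
--             pc += 1
--         elif r == 'A':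
--             atk += 1
--         elif r == 'T' or r == 'T/A':
--             wings += 1
--         if pc >= 3 or pc + atk >= 4 or (pc >= 2 and (atk >= 1 or wings >= 2)):
--             return True
--     return False
-- ===== Notes on version B (the rewrite author's own statement) =====
-- stated objective: alternative
-- what changed: Replaces A's four separate counting scans plus a final four-condition test with a single early-exit scan that maintains running counters and returns True the moment a monotone reformulation of the illegality condition (pc>=3 or pc+a>=4 or (pc>=2 and (a>=1 or wings>=2))) becomes true.
import Mathlib
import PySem

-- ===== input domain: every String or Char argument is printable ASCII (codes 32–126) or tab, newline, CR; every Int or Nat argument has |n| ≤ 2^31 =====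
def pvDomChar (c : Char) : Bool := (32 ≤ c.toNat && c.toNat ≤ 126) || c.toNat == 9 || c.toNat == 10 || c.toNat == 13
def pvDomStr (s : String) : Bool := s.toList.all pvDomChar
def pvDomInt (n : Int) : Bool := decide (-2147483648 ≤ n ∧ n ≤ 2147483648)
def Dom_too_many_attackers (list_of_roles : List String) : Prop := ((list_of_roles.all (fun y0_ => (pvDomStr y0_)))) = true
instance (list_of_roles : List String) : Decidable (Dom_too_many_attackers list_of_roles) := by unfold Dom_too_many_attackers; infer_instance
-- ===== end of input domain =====

-- B replaces A's four full counting scans + final test by one early-exit scan over the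
-- list with running counters and an equivalent monotone condition (objective: alternative).


-- ===== PORT A =====
-- sum([1 for i in list_of_roles if i == r])
def pvSumOnes (list_of_roles : List String) (r : String) : Int :=
  ((list_of_roles.filter (fun i => i == r)).map (fun _ => (1 : Int))).foldl (· + ·) 0

def too_many_attackers (list_of_roles : List String) : Bool :=
  let pc_count := pvSumOnes list_of_roles "Pc"
  let cond1 := pc_count == 3
  let a_count := pvSumOnes list_of_roles "A"
  let cond2 := pc_count == 2 && decide (a_count > 0)
  let t_count := pvSumOnes list_of_roles "T"
  let ta_count := pvSumOnes list_of_roles "T/A"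
  let cond3 := pc_count == 2 && decide (t_count + ta_count > 1)
  let cond4 := decide (pc_count + a_count > 3)
  if cond1 || cond2 || cond3 || cond4 then true else false

-- ===== PORT B =====
-- the monotone illegality test B checks after each element
def pvBad (pc atk wings : Int) : Bool :=
  decide (pc ≥ 3) || decide (pc + atk ≥ 4) || (decide (pc ≥ 2) && (decide (atk ≥ 1) || decide (wings ≥ 2)))

-- B's loop: update the running counters, return true as soon as pvBad holds
def pvScan (roles : List String) (pc atk wings : Int) : Bool :=
  match roles with
  | [] => false
  | r :: rest =>
    let st :=
      if r = "Pc" then (pc + 1, atk, wings)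
      else if r = "A" then (pc, atk + 1, wings)
      else if r = "T" ∨ r = "T/A" then (pc, atk, wings + 1)
      else (pc, atk, wings)
    if pvBad st.1 st.2.1 st.2.2 then true else pvScan rest st.1 st.2.1 st.2.2

def too_many_attackers_alt (list_of_roles : List String) : Bool :=
  pvScan list_of_roles 0 0 0

-- ===== PRECONDITION & SPEC =====
def Spec_too_many_attackers (list_of_roles : List String) (out : Bool) : Prop := out = too_many_attackers_alt list_of_roles
instance (list_of_roles : List String) (out : Bool) : Decidable (Spec_too_many_attackers list_of_roles out) := by unfold Spec_too_many_attackers; infer_instance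

-- ===== CLAIM (what is proved, stated in full; the proofs are below) =====
def Claim_equal_too_many_attackers : Prop := ∀ (list_of_roles : List String), Dom_too_many_attackers list_of_roles → Spec_too_many_attackers list_of_roles (too_many_attackers list_of_roles)

-- ===== LEMMAS AND PROOFS =====
theorem pvSumOnes_eq_count (l : List String) (r : String) :
    pvSumOnes l r = (l.count r : Int) := by
  unfold pvSumOnes
  have h : ∀ (ys : List String) (init : Int),
      (ys.map (fun _ => (1 : Int))).foldl (· + ·) init = init + ys.length := by
    intro ys
    induction ys with
    | nil => intro init; simp
    | cons x xs ih =>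
        intro init
        simp only [List.map_cons, List.foldl_cons, ih, List.length_cons]
        push_cast; ring
  rw [h]
  simp [List.count, List.countP_eq_length_filter]

-- per-element increments of the three counters in B's step
def pvD1 (r : String) : Int := if r = "Pc" then 1 else 0
def pvD2 (r : String) : Int := if r = "Pc" then 0 else if r = "A" then 1 else 0
def pvD3 (r : String) : Int :=
  if r = "Pc" then 0 else if r = "A" then 0 else if r = "T" ∨ r = "T/A" then 1 else 0

theorem pvStep_eq (r : String) (pc atk wings : Int) :
    (if r = "Pc" then (pc + 1, atk, wings)
     else if r = "A" then (pc, atk + 1, wings)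
     else if r = "T" ∨ r = "T/A" then (pc, atk, wings + 1)
     else (pc, atk, wings))
    = (pc + pvD1 r, atk + pvD2 r, wings + pvD3 r) := by
  unfold pvD1 pvD2 pvD3
  split_ifs <;> simp

theorem pvD2_indicator (r : String) : pvD2 r = if r = "A" then 1 else 0 := by
  unfold pvD2; split_ifs with h1 h2 <;> simp_all

theorem pvD3_indicator (r : String) : pvD3 r = (if r = "T" then 1 else 0) + (if r = "T/A" then 1 else 0) := by
  unfold pvD3
  by_cases h1 : r = "Pc" <;> by_cases h2 : r = "A" <;>
    by_cases h3 : r = "T" <;> by_cases h4 : r = "T/A" <;> simp_all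

theorem count_cons_int (r : String) (rest : List String) (s : String) :
    ((r :: rest).count s : Int) = (rest.count s : Int) + (if r = s then 1 else 0) := by
  simp [List.count_cons, beq_iff_eq]

theorem pvBad_mono {pc atk wings pc' atk' wings' : Int}
    (h1 : pc ≤ pc') (h2 : atk ≤ atk') (h3 : wings ≤ wings')
    (hb : pvBad pc atk wings = true) : pvBad pc' atk' wings' = true := by
  simp only [pvBad, Bool.or_eq_true, Bool.and_eq_true, decide_eq_true_eq] at *
  omega

-- the early-exit scan computes pvBad of the final counts, provided pvBad does not hold initially
theorem pvScan_eq (l : List String) :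
    ∀ pc atk wings : Int, pvBad pc atk wings = false →
      pvScan l pc atk wings =
        pvBad (pc + l.count "Pc") (atk + l.count "A")
              (wings + ((l.count "T" : Int) + (l.count "T/A" : Int))) := by
  induction l with
  | nil => intro pc atk wings h; simp [pvScan, h]
  | cons r rest ih =>
      intro pc atk wings h
      have hc1 : ((r :: rest).count "Pc" : Int) = (rest.count "Pc" : Int) + pvD1 r := by
        rw [count_cons_int]; rfl
      have hc2 : ((r :: rest).count "A" : Int) = (rest.count "A" : Int) + pvD2 r := by
        rw [count_cons_int, pvD2_indicator]
      have hc3 : ((r :: rest).count "T" : Int) + ((r :: rest).count "T/A" : Int)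
          = ((rest.count "T" : Int) + (rest.count "T/A" : Int)) + pvD3 r := by
        rw [count_cons_int, count_cons_int, pvD3_indicator]; ring
      simp only [pvScan, pvStep_eq]
      have n1 : (0 : Int) ≤ (rest.count "Pc" : Int) := Int.natCast_nonneg _
      have n2 : (0 : Int) ≤ (rest.count "A" : Int) := Int.natCast_nonneg _
      have n3 : (0 : Int) ≤ (rest.count "T" : Int) := Int.natCast_nonneg _
      have n4 : (0 : Int) ≤ (rest.count "T/A" : Int) := Int.natCast_nonneg _
      by_cases hb : pvBad (pc + pvD1 r) (atk + pvD2 r) (wings + pvD3 r) = true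
      · rw [if_pos hb]
        have : pvBad (pc + ((r :: rest).count "Pc" : Int))
            (atk + ((r :: rest).count "A" : Int))
            (wings + (((r :: rest).count "T" : Int) + ((r :: rest).count "T/A" : Int))) = true := by
          rw [hc1, hc2, hc3]
          exact pvBad_mono (by linarith) (by linarith) (by linarith) hb
        simpa using this.symm
      · rw [if_neg hb, ih _ _ _ (Bool.not_eq_true _ ▸ hb)]
        rw [hc1, hc2, hc3]
        ring_nf

-- A's final four-condition test equals B's monotone test, for nonnegative counts
theorem pvFinal_eq (p a t ta : ℕ) :
    (let pc_count := (p : Int)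
     let cond1 := pc_count == 3
     let a_count := (a : Int)
     let cond2 := pc_count == 2 && decide (a_count > 0)
     let cond3 := pc_count == 2 && decide ((t : Int) + (ta : Int) > 1)
     let cond4 := decide (pc_count + a_count > 3)
     if cond1 || cond2 || cond3 || cond4 then true else false)
    = pvBad (p : Int) (a : Int) ((t : Int) + (ta : Int)) := by
  simp only [pvBad]
  rw [Bool.eq_iff_iff]
  simp only [Bool.if_false_right, Bool.and_true, Bool.or_eq_true,
    Bool.and_eq_true, beq_iff_eq, decide_eq_true_eq]
  omega

-- ===== VERDICT (by name: the statement is the Claim_ definition above) =====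
theorem too_many_attackers_spec : Claim_equal_too_many_attackers := by
  intro l _
  show too_many_attackers l = too_many_attackers_alt l
  unfold too_many_attackers too_many_attackers_alt
  rw [pvScan_eq l 0 0 0 (by decide)]
  simp only [pvSumOnes_eq_count, zero_add]
  exact pvFinal_eq (l.count "Pc") (l.count "A") (l.count "T") (l.count "T/A")
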